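-- pv_equiv track=rewrite | github.com/WhyNoobMaster69IsNotAvailable/GG-Bot-Upload-Assistant | modules/custom_actions/ptp_actions.py | _get_tags
-- ===== SOURCE A (Python) =====
-- def _get_tags(imdb_tags, tmdb_tags):
--     tags = []
--     imdb_tags.extend(tmdb_tags)
--     input_tags = set(imdb_tags)
--     ptp_tags = [
--         "action", "adventure", "animation", "arthouse", "asian", "biography", "camp", "comedy",
--         "crime", "cult", "documentary", "drama", "experimental", "exploitation", "family", "fantasy", "film.noir",
--         "history", "horror", "martial.arts", "musical", "mystery", "performance", "philosophy", "politics", "romance",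
--         "sci.fi", "short", "silent", "sport", "thriller", "video.art", "war", "western"
--     ]
--     for tag in ptp_tags:
--         if any(tag.replace('.', '') in x for x in input_tags):
--             tags.append(tag)
--     return tags
-- ===== SOURCE B (Python) =====
-- def _get_tags(imdb_tags, tmdb_tags):
--     imdb_tags.extend(tmdb_tags)
--     ptp_tags = [
--         "action", "adventure", "animation", "arthouse", "asian", "biography", "camp", "comedy",
--         "crime", "cult", "documentary", "drama", "experimental", "exploitation", "family", "fantasy", "film.noir",
--         "history", "horror", "martial.arts", "musical", "mystery", "performance", "philosophy", "politics", "romance",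
--         "sci.fi", "short", "silent", "sport", "thriller", "video.art", "war", "western"
--     ]
--     # first-character index of the cleaned patterns: one dict lookup per scanned
--     # position replaces the per-pattern substring search
--     keyed = [(tag.replace('.', '')[0], (tag.replace('.', ''), tag)) for tag in ptp_tags]
--     by_first = {}
--     for c, entry in keyed:
--         by_first[c] = by_first.get(c, []) + [entry]
--     matched = set()
--     for x in imdb_tags:
--         for j, c in enumerate(x):
--             for pat, tag in by_first.get(c, []):
--                 if x.startswith(pat, j):
--                     matched.add(tag)
--     return [tag for tag in ptp_tags if tag in matched]
-- ===== Notes on version B (the rewrite author's own statement) =====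
-- stated objective: alternative
-- what changed: Replaces A's per-tag any() substring scan with a first-character index of the cleaned patterns plus one position scan per input string (prefix tests only at positions whose character starts some pattern), accumulating a matched set that is filtered against the fixed tag list at the end.
import Mathlib
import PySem

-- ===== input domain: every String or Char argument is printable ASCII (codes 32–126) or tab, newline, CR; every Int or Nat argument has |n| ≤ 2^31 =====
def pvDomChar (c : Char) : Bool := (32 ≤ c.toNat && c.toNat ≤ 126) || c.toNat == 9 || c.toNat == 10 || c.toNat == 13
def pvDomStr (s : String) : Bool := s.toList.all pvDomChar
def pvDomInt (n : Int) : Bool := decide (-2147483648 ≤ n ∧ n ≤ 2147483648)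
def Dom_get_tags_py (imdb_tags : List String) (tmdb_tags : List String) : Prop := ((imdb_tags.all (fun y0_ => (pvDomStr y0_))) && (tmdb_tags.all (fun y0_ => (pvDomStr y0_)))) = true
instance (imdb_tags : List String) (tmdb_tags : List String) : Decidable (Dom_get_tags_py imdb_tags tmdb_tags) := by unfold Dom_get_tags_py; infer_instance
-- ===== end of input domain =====

-- B replaces A's per-tag any() substring scan by a first-character index of the cleaned
-- patterns and one position scan over each input string accumulating a matched set, then a
-- final filter of the fixed tag list (objective: alternative; A's in-place extend of
-- imdb_tags is a side effect kept by B but outside the return-value equivalence proved here).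


-- the fixed PTP tag list, shared verbatim by both Pythons
def pvPtpTags : List String := [
  "action", "adventure", "animation", "arthouse", "asian", "biography", "camp", "comedy",
  "crime", "cult", "documentary", "drama", "experimental", "exploitation", "family", "fantasy", "film.noir",
  "history", "horror", "martial.arts", "musical", "mystery", "performance", "philosophy", "politics", "romance",
  "sci.fi", "short", "silent", "sport", "thriller", "video.art", "war", "western"]

-- ===== PORT A =====
def get_tags_py (imdb_tags : List String) (tmdb_tags : List String) : List String :=
  let imdb' := imdb_tags ++ tmdb_tags            -- imdb_tags.extend(tmdb_tags)
  let input_tags : PySem.Set String := PySem.Set.ofList imdb'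
  pvPtpTags.foldl (fun tags tag =>
    if input_tags.any (fun x => PySem.Str.isIn (PySem.Str.replace tag "." "") x)
    then tags ++ [tag] else tags) []

-- ===== PORT B =====
-- tag.replace('.', '')
def pvClean (t : String) : String := PySem.Str.replace t "." ""
-- keyed = [(pat[0], (pat, tag)) …]; pat[0] ported as headD: every cleaned tag is nonempty,
-- so this is exact (no IndexError is reachable)
def pvKeyed : List (Char × (String × String)) :=
  pvPtpTags.map (fun tag => ((pvClean tag).toList.headD ' ', (pvClean tag, tag)))
-- by_first[c] = by_first.get(c, []) + [entry]
def pvIndex : PySem.Dict Char (List (String × String)) :=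
  pvKeyed.foldl (fun d p => d.modify p.1 [] (· ++ [p.2])) PySem.Dict.empty

def get_tags_py_alt (imdb_tags : List String) (tmdb_tags : List String) : List String :=
  let inputs := imdb_tags ++ tmdb_tags           -- imdb_tags.extend(tmdb_tags)
  -- for x in imdb_tags: for j, c in enumerate(x): for pat, tag in by_first.get(c, []):
  --   if x.startswith(pat, j): matched.add(tag)
  -- x.startswith(pat, j) ported by hand as pat.toList.isPrefixOf (x.toList.drop j.toNat):
  -- exact, since enumerate only yields 0 ≤ j < len(x)
  let matched : PySem.Set String := inputs.foldl (fun m x =>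
    (PySem.List.enumerate x.toList 0).foldl (fun m jc =>
      (pvIndex.getD jc.2 []).foldl (fun m pt =>
        if pt.1.toList.isPrefixOf (x.toList.drop jc.1.toNat) then PySem.Set.add m pt.2 else m) m) m)
    PySem.Set.empty
  pvPtpTags.filter (fun tag => PySem.Set.contains matched tag)

-- ===== PRECONDITION & SPEC =====
def Spec_get_tags_py (imdb_tags : List String) (tmdb_tags : List String) (out : List String) : Prop := out = get_tags_py_alt imdb_tags tmdb_tags
instance (imdb_tags : List String) (tmdb_tags : List String) (out : List String) : Decidable (Spec_get_tags_py imdb_tags tmdb_tags out) := by unfold Spec_get_tags_py; infer_instance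

-- ===== CLAIM (what is proved, stated in full; the proofs are below) =====
def Claim_equal_get_tags_py : Prop := ∀ (imdb_tags : List String) (tmdb_tags : List String), Dom_get_tags_py imdb_tags tmdb_tags → Spec_get_tags_py imdb_tags tmdb_tags (get_tags_py imdb_tags tmdb_tags)

-- ===== LEMMAS AND PROOFS =====

-- membership in a conditional-add fold over any list
theorem mem_foldl_add_if {α β : Type} [BEq β] [LawfulBEq β] (l : List α) (p : α → Bool)
    (f : α → β) (m : PySem.Set β) (t : β) :
    t ∈ l.foldl (fun m a => if p a then PySem.Set.add m (f a) else m) m ↔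
      t ∈ m ∨ ∃ a ∈ l, f a = t ∧ p a = true := by
  induction l generalizing m with
  | nil => simp
  | cons a as ih =>
    simp only [List.foldl_cons]
    by_cases h : p a = true
    · rw [if_pos h, ih, PySem.Set.mem_add]
      constructor
      · rintro (⟨hm | he⟩ | ⟨b, hb, h1, h2⟩)
        · exact Or.inl hm
        · exact Or.inr ⟨a, by simp, he.symm, h⟩
        · exact Or.inr ⟨b, by simp [hb], h1, h2⟩
      · rintro (hm | ⟨b, hb, h1, h2⟩)
        · exact Or.inl (Or.inl hm)
        · rcases List.mem_cons.mp hb with rfl | hb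
          · exact Or.inl (Or.inr h1.symm)
          · exact Or.inr ⟨b, hb, h1, h2⟩
    · rw [if_neg h, ih]
      constructor
      · rintro (hm | ⟨b, hb, h1, h2⟩)
        · exact Or.inl hm
        · exact Or.inr ⟨b, by simp [hb], h1, h2⟩
      · rintro (hm | ⟨b, hb, h1, h2⟩)
        · exact Or.inl hm
        · rcases List.mem_cons.mp hb with rfl | hb
          · exact absurd h2 (by simpa using h)
          · exact Or.inr ⟨b, hb, h1, h2⟩

-- membership after scanning the positions L of one input string x
theorem mem_scan_string (x : String) (L : List (Int × Char)) (m : PySem.Set String) (t : String) :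
    t ∈ L.foldl (fun m jc =>
        (pvIndex.getD jc.2 []).foldl (fun m pt =>
          if pt.1.toList.isPrefixOf (x.toList.drop jc.1.toNat) then PySem.Set.add m pt.2 else m) m) m ↔
      t ∈ m ∨ ∃ jc ∈ L, ∃ pt ∈ pvIndex.getD jc.2 [],
        pt.2 = t ∧ pt.1.toList.isPrefixOf (x.toList.drop jc.1.toNat) = true := by
  induction L generalizing m with
  | nil => simp
  | cons jc rest ih =>
    simp only [List.foldl_cons]
    rw [ih]
    constructor
    · rintro (hm | ⟨q, hq, hp⟩)
      · rcases (mem_foldl_add_if _ _ _ _ _).mp hm with hm | ⟨pt, hpt, h1, h2⟩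
        · exact Or.inl hm
        · exact Or.inr ⟨jc, by simp, pt, hpt, h1, h2⟩
      · exact Or.inr ⟨q, by simp [hq], hp⟩
    · rintro (hm | ⟨q, hq, pt, hpt, h1, h2⟩)
      · exact Or.inl ((mem_foldl_add_if _ _ _ _ _).mpr (Or.inl hm))
      · rcases List.mem_cons.mp hq with rfl | hq
        · exact Or.inl ((mem_foldl_add_if _ _ _ _ _).mpr (Or.inr ⟨pt, hpt, h1, h2⟩))
        · exact Or.inr ⟨q, hq, pt, hpt, h1, h2⟩

-- membership in B's matched set over all inputs
theorem mem_matched (inputs : List String) (m : PySem.Set String) (t : String) :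
    t ∈ inputs.foldl (fun m x =>
        (PySem.List.enumerate x.toList 0).foldl (fun m jc =>
          (pvIndex.getD jc.2 []).foldl (fun m pt =>
            if pt.1.toList.isPrefixOf (x.toList.drop jc.1.toNat) then PySem.Set.add m pt.2 else m) m) m) m ↔
      t ∈ m ∨ ∃ x ∈ inputs, ∃ jc ∈ PySem.List.enumerate x.toList 0, ∃ pt ∈ pvIndex.getD jc.2 [],
        pt.2 = t ∧ pt.1.toList.isPrefixOf (x.toList.drop jc.1.toNat) = true := by
  induction inputs generalizing m with
  | nil => simp
  | cons y ys ih =>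
    simp only [List.foldl_cons]
    rw [ih]
    constructor
    · rintro (hm | ⟨x, hx, hp⟩)
      · rcases (mem_scan_string _ _ _ _).mp hm with hm | hp
        · exact Or.inl hm
        · exact Or.inr ⟨y, by simp, hp⟩
      · exact Or.inr ⟨x, by simp [hx], hp⟩
    · rintro (hm | ⟨x, hx, hp⟩)
      · exact Or.inl ((mem_scan_string _ _ _ _).mpr (Or.inl hm))
      · rcases List.mem_cons.mp hx with rfl | hx
        · exact Or.inl ((mem_scan_string _ _ _ _).mpr (Or.inr hp))
        · exact Or.inr ⟨x, hx, hp⟩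

-- what the first-character index holds at key c
theorem mem_index (c : Char) (pt : String × String) :
    pt ∈ pvIndex.getD c [] ↔
      pt.2 ∈ pvPtpTags ∧ pt.1 = pvClean pt.2 ∧ (pvClean pt.2).toList.headD ' ' = c := by
  unfold pvIndex
  rw [PySem.Dict.getD_foldl_modify_append, PySem.Dict.getD_empty, List.nil_append]
  unfold pvKeyed
  simp only [List.filter_map, List.map_map, List.mem_map, List.mem_filter, Function.comp]
  constructor
  · rintro ⟨tag, ⟨htag, hc⟩, rfl⟩
    exact ⟨htag, rfl, by simpa using hc⟩
  · rintro ⟨htag, h1, h2⟩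
    refine ⟨pt.2, ⟨htag, by simpa using h2⟩, ?_⟩
    simp [← h1]

-- every cleaned tag is a nonempty char list
theorem clean_ne_nil : ∀ t ∈ pvPtpTags, (pvClean t).toList ≠ [] := by decide

-- per-tag bridge: A's "some input contains the cleaned tag" ↔ B's matched set holds the tag
theorem match_iff (inputs : List String) (tag : String) (htag : tag ∈ pvPtpTags) :
    (∃ x ∈ inputs, PySem.Str.isIn (pvClean tag) x = true) ↔
      ∃ x ∈ inputs, ∃ jc ∈ PySem.List.enumerate x.toList 0, ∃ pt ∈ pvIndex.getD jc.2 [],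
        pt.2 = tag ∧ pt.1.toList.isPrefixOf (x.toList.drop jc.1.toNat) = true := by
  constructor
  · rintro ⟨x, hx, hin⟩
    rw [PySem.Str.isIn_iff_infix] at hin
    obtain ⟨j, hpre⟩ := (PySem.Chars.exists_prefix_drop_iff_isIn _ _).mpr
      ((PySem.Chars.isIn_iff_infix _ _).mpr hin)
    -- pat is nonempty, so j is a valid position and x[j] is pat's head
    have hne := clean_ne_nil tag htag
    obtain ⟨h0, rest, hpat⟩ : ∃ h0 rest, (pvClean tag).toList = h0 :: rest := by
      cases hp : (pvClean tag).toList with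
      | nil => exact absurd hp hne
      | cons a l => exact ⟨a, l, rfl⟩
    have hj : j < x.toList.length := by
      by_contra h
      have hdn : List.drop j x.toList = [] := List.drop_eq_nil_of_le (by omega)
      rw [hdn, hpat] at hpre
      exact absurd (List.prefix_nil.mp hpre) (by simp)
    have hhead : x.toList[j] = h0 := by
      obtain ⟨s, hs⟩ := hpre
      have h2 : (List.drop j x.toList)[0]? = some h0 := by rw [← hs, hpat]; simp
      rw [List.getElem?_drop, Nat.add_zero, List.getElem?_eq_getElem hj] at h2
      exact Option.some.inj h2
    refine ⟨x, hx, ((j : Int), x.toList[j]), ?_, (pvClean tag, tag), ?_, rfl, ?_⟩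
    · exact (PySem.List.mem_enumerate_iff _ _ _).mpr ⟨j, hj, by simp⟩
    · rw [mem_index]
      exact ⟨htag, rfl, by rw [hpat]; simpa using hhead.symm⟩
    · simpa using hpre
  · rintro ⟨x, hx, jc, _, pt, hpt, h1, h2⟩
    rw [mem_index] at hpt
    obtain ⟨_, hp1, _⟩ := hpt
    refine ⟨x, hx, ?_⟩
    rw [PySem.Str.isIn_iff_infix, ← PySem.Chars.isIn_iff_infix _ _,
      ← PySem.Chars.exists_prefix_drop_iff_isIn _ _]
    subst h1
    rw [← hp1]
    exact ⟨jc.1.toNat, (List.isPrefixOf_iff_prefix).mp h2⟩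

theorem get_tags_py_spec : Claim_equal_get_tags_py := by
  intro imdb_tags tmdb_tags _
  show get_tags_py imdb_tags tmdb_tags = get_tags_py_alt imdb_tags tmdb_tags
  unfold get_tags_py get_tags_py_alt
  rw [PySem.List.foldl_append_if_eq_filter, List.nil_append]
  apply List.filter_congr
  intro tag htag
  have key := match_iff (imdb_tags ++ tmdb_tags) tag htag
  rcases Bool.eq_false_or_eq_true (PySem.Set.contains
      ((imdb_tags ++ tmdb_tags).foldl (fun m x =>
        (PySem.List.enumerate x.toList 0).foldl (fun m jc =>
          (pvIndex.getD jc.2 []).foldl (fun m pt =>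
            if pt.1.toList.isPrefixOf (x.toList.drop jc.1.toNat) then PySem.Set.add m pt.2 else m) m) m)
        PySem.Set.empty) tag) with hc | hc
  · rw [hc]
    have hmem := (PySem.Set.contains_iff _ _).mp hc
    rcases (mem_matched _ _ _).mp hmem with hm | hm
    · simp [PySem.Set.empty] at hm
    · obtain ⟨x, hx, hin⟩ := key.mpr hm
      apply List.any_eq_true.mpr
      exact ⟨x, (PySem.Set.mem_ofList _ _).mpr hx, by simpa [pvClean] using hin⟩
  · rw [hc]
    apply List.any_eq_false.mpr
    intro x hx
    simp only [Bool.not_eq_true]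
    by_contra h
    have hin : PySem.Str.isIn (pvClean tag) x = true := by
      simpa [pvClean] using Bool.not_eq_false _ |>.mp h
    have := key.mp ⟨x, (PySem.Set.mem_ofList _ _).mp hx, hin⟩
    have hmem : tag ∈ (imdb_tags ++ tmdb_tags).foldl (fun m x =>
        (PySem.List.enumerate x.toList 0).foldl (fun m jc =>
          (pvIndex.getD jc.2 []).foldl (fun m pt =>
            if pt.1.toList.isPrefixOf (x.toList.drop jc.1.toNat) then PySem.Set.add m pt.2 else m) m) m)
        PySem.Set.empty := (mem_matched _ _ _).mpr (Or.inr this)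
    rw [← PySem.Set.contains_iff] at hmem
    rw [hmem] at hc
    exact Bool.true_eq_false.mp hc
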